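-- pv_equiv track=rewrite | github.com/zctao/ntuplerTT | test/generate_jobfiles_mini362_v1.py | matchFilterKeys
-- ===== SOURCE A (Python) =====
-- def matchFilterKeys(keywords, filters):
--     all_matched = True
--
--     for kw_filter in filters:
--         amatch = False
--         for kw in keywords:
--             if kw_filter in kw:
--                 amatch = True
--                 break
--
--         all_matched &= amatch
--
--     return all_matched
-- ===== SOURCE B (Python) =====
-- def matchFilterKeys(keywords, filters):
--     unmatched = list(filters)
--     for kw in keywords:
--         if not unmatched:
--             break
--         unmatched = [f for f in unmatched if f not in kw]
--     return not unmatched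
-- ===== Notes on version B (the rewrite author's own statement) =====
-- stated objective: alternative
-- what changed: Inverts the loop nesting: instead of a per-filter flag with an inner scan over keywords, B keeps a shrinking list of still-unmatched filters, strikes out matches per keyword, breaks early once empty, and returns whether anything remains.
import Mathlib
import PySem

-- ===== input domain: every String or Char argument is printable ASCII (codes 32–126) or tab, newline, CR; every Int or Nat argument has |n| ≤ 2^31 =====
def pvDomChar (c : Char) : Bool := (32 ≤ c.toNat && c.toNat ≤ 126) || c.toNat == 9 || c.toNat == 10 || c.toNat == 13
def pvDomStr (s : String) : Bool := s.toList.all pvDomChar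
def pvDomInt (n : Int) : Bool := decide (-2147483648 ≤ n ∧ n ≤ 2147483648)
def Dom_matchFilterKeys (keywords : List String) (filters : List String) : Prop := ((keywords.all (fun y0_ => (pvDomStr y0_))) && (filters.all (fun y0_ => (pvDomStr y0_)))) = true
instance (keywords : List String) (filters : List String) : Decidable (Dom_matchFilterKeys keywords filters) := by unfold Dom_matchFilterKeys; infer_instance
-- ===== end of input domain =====

-- B inverts the loop nesting: a shrinking list of unmatched filters, struck out per keyword with an early break (alternative decomposition, return value identical).

-- ===== PORT A =====
-- inner 'for kw in keywords: if kw_filter in kw: amatch = True; break'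
def pvAInner (kw_filter : String) : List String → Bool
  | [] => false
  | kw :: rest => if PySem.Str.isIn kw_filter kw then true else pvAInner kw_filter rest

def matchFilterKeys (keywords : List String) (filters : List String) : Bool :=
  filters.foldl (fun all_matched kw_filter => all_matched && pvAInner kw_filter keywords) true

-- ===== PORT B =====
-- 'unmatched = [f for f in unmatched if f not in kw]'
def pvBStep (kw : String) (unmatched : List String) : List String :=
  unmatched.filter (fun f => !(PySem.Str.isIn f kw))

-- outer loop over keywords with early break when unmatched is empty
def pvBLoop : List String → List String → List String
  | [], unmatched => unmatched
  | kw :: rest, unmatched =>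
      if unmatched.isEmpty then unmatched else pvBLoop rest (pvBStep kw unmatched)

def matchFilterKeys_alt (keywords : List String) (filters : List String) : Bool :=
  (pvBLoop keywords filters).isEmpty

-- ===== PRECONDITION & SPEC =====
def Spec_matchFilterKeys (keywords : List String) (filters : List String) (out : Bool) : Prop := out = matchFilterKeys_alt keywords filters
instance (keywords : List String) (filters : List String) (out : Bool) : Decidable (Spec_matchFilterKeys keywords filters out) := by unfold Spec_matchFilterKeys; infer_instance

-- ===== CLAIM (what is proved, stated in full; the proofs are below) =====
def Claim_equal_matchFilterKeys : Prop := ∀ (keywords : List String) (filters : List String), Dom_matchFilterKeys keywords filters → Spec_matchFilterKeys keywords filters (matchFilterKeys keywords filters)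

-- ===== LEMMAS AND PROOFS =====

-- A's inner loop is an 'any' over keywords
theorem pvAInner_eq_any (f : String) (ks : List String) :
    pvAInner f ks = ks.any (fun kw => PySem.Str.isIn f kw) := by
  induction ks with
  | nil => rfl
  | cons k rest ih =>
      simp only [pvAInner, List.any_cons]
      split_ifs with h
      · rw [h]; rfl
      · rw [ih, Bool.not_eq_true] at *
        rw [h, Bool.false_or]

-- the '&&'-accumulating fold is 'b && all'
theorem foldl_and_eq (p : String → Bool) (b : Bool) (l : List String) :
    l.foldl (fun acc x => acc && p x) b = (b && l.all p) := by
  induction l generalizing b with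
  | nil => simp
  | cons x t ih => simp [List.foldl_cons, ih, Bool.and_assoc]

-- A's fold over filters is an 'all'
theorem pvA_eq_all (ks fs : List String) :
    matchFilterKeys ks fs = fs.all (fun f => pvAInner f ks) := by
  unfold matchFilterKeys
  rw [foldl_and_eq, Bool.true_and]

-- B's loop keeps exactly the filters matched by no traversed keyword
theorem pvBLoop_eq_filter (ks us : List String) :
    pvBLoop ks us = us.filter (fun f => !(ks.any (fun kw => PySem.Str.isIn f kw))) := by
  induction ks generalizing us with
  | nil => simp [pvBLoop]
  | cons k rest ih =>
      simp only [pvBLoop]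
      split_ifs with h
      · rcases List.isEmpty_iff.mp h with rfl; simp
      · rw [ih, pvBStep, List.filter_filter]
        apply List.filter_congr
        intro f _
        cases h : PySem.Chars.isIn f.toList k.toList <;>
          simp [List.any_cons, PySem.Str.isIn, h]

theorem matchFilterKeys_eq (ks fs : List String) :
    matchFilterKeys ks fs = matchFilterKeys_alt ks fs := by
  rw [pvA_eq_all, matchFilterKeys_alt, pvBLoop_eq_filter, Bool.eq_iff_iff]
  simp [List.isEmpty_iff, List.filter_eq_nil_iff, pvAInner_eq_any, List.all_eq_true]

-- ===== VERDICT (by name: the statement is the Claim_ definition above) =====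
theorem matchFilterKeys_spec : Claim_equal_matchFilterKeys := by
  intro ks fs _
  unfold Spec_matchFilterKeys
  exact matchFilterKeys_eq ks fs
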